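-- pv_equiv track=rewrite | github.com/JoukoRintamaki/mooc-ohjelmointi-21 | osa04-19_listan_pisimmat/src/listan_pisimmat.py | pisimmat
-- ===== SOURCE A (Python) =====
-- def pisimmat(lista: list):
--     pisimmat = []
--     pisimmat.append(lista[0])
--     for i in lista:
--         if len(i) > len(pisimmat[0]):
--             pisimmat.clear()
--             pisimmat.append(i)
--         elif len(i) == len(pisimmat[0]) and i not in pisimmat:
--             pisimmat.append(i)
--     return pisimmat
-- ===== SOURCE B (Python) =====
-- def pisimmat(lista: list):
--     maxlen = len(lista[0])
--     for s in lista: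
--         if len(s) > maxlen:
--             maxlen = len(s)
--     tulos = []
--     for s in lista:
--         if len(s) == maxlen and s not in tulos:
--             tulos.append(s)
--     return tulos
-- ===== Notes on version B (the rewrite author's own statement) =====
-- stated objective: simpler
-- what changed: Replaced A's single adaptive pass that clears and rebuilds its accumulator whenever a longer string appears with a two-phase decomposition: one loop to find the maximum length, one loop to collect distinct strings of that length in order.
import Mathlib
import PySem

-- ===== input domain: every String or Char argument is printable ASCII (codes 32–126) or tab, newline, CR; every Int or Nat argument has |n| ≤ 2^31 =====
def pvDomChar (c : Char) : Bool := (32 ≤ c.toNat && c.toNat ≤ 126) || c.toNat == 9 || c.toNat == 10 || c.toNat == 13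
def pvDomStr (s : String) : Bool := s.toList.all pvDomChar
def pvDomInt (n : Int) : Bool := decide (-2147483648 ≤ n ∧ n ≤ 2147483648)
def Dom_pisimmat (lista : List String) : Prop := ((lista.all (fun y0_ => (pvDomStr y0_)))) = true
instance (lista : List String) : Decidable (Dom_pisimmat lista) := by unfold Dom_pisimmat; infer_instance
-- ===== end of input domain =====

-- B replaces A's single adaptive pass (clear-and-rebuild accumulator) with a simpler
-- two-phase decomposition: find the maximum length, then collect distinct strings of
-- that length in order (objective: simpler; same cost).

-- ===== PORT A =====
-- loop body of A's for-loop (pisimmat[0] = pyGetD acc 0 "", always in range since acc stays nonempty)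
def pvStepA (acc : List String) (i : String) : List String :=
  if PySem.Str.len i > PySem.Str.len (PySem.List.pyGetD acc 0 "") then [i]
  else if PySem.Str.len i = PySem.Str.len (PySem.List.pyGetD acc 0 "") ∧ i ∉ acc then acc ++ [i]
  else acc

def pisimmat (lista : List String) : List String :=
  match PySem.List.pyGet? lista 0 with
  | none => []     -- lista[0] raises IndexError here; excluded by Pre_pisimmat
  | some x => lista.foldl pvStepA [x]

-- ===== PORT B =====
-- first loop body: maxlen update
def pvMaxStep (m : Int) (s : String) : Int :=
  if PySem.Str.len s > m then PySem.Str.len s else m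
-- second loop body: append strings of length M not already collected
def pvCollect (M : Int) (r : List String) (s : String) : List String :=
  if PySem.Str.len s = M ∧ s ∉ r then r ++ [s] else r

def pisimmat_alt (lista : List String) : List String :=
  match PySem.List.pyGet? lista 0 with
  | none => []     -- len(lista[0]) raises IndexError here; excluded by Pre_pisimmat
  | some x => lista.foldl (pvCollect (lista.foldl pvMaxStep (PySem.Str.len x))) []

-- ===== PRECONDITION & SPEC =====
-- A (and B) raise IndexError on the empty list; nothing else raises.
def Pre_pisimmat (lista : List String) : Prop := lista ≠ []
instance (lista : List String) : Decidable (Pre_pisimmat lista) := by unfold Pre_pisimmat; infer_instance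
def pvWitness_pisimmat : List String := (["a"])

def Spec_pisimmat (lista : List String) (out : List String) : Prop := out = pisimmat_alt lista
instance (lista : List String) (out : List String) : Decidable (Spec_pisimmat lista out) := by unfold Spec_pisimmat; infer_instance

-- ===== CLAIM (what is proved, stated in full; the proofs are below) =====
def Claim_equal_pisimmat : Prop := ∀ (lista : List String), Dom_pisimmat lista → Pre_pisimmat lista → Spec_pisimmat lista (pisimmat lista)

-- ===== LEMMAS AND PROOFS =====

theorem pv_le_foldl_max : ∀ (l : List String) (m : Int), m ≤ l.foldl pvMaxStep m := by
  intro l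
  induction l with
  | nil => intro m; simp
  | cons s l ih =>
    intro m
    simp only [List.foldl_cons, pvMaxStep]
    split_ifs with h
    · exact le_trans (le_of_lt h) (ih _)
    · exact ih _

theorem pv_head_len {acc : List String} {m0 : Int} (hne : acc ≠ [])
    (hlen : ∀ a ∈ acc, PySem.Str.len a = m0) :
    PySem.Str.len (PySem.List.pyGetD acc 0 "") = m0 := by
  match acc, hne with
  | a :: acc, _ =>
    have : PySem.List.pyGetD (a :: acc) (0 : Int) "" = a := by
      simp [PySem.List.pyGetD]
    rw [this]
    exact hlen a (by simp)

theorem pv_main : ∀ (l acc : List String) (m0 : Int), acc ≠ [] →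
    (∀ a ∈ acc, PySem.Str.len a = m0) →
    l.foldl pvStepA acc =
      (if l.foldl pvMaxStep m0 = m0 then l.foldl (pvCollect m0) acc
       else l.foldl (pvCollect (l.foldl pvMaxStep m0)) []) := by
  intro l
  induction l with
  | nil => intro acc m0 hne hlen; simp
  | cons s l ih =>
    intro acc m0 hne hlen
    have hh := pv_head_len hne hlen
    simp only [List.foldl_cons]
    by_cases h1 : PySem.Str.len s > m0
    · -- longer string: accumulator cleared, restarts with [s]
      have hstep : pvStepA acc s = [s] := by
        unfold pvStepA; rw [hh, if_pos h1]
      have hmax : pvMaxStep m0 s = PySem.Str.len s := by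
        unfold pvMaxStep; rw [if_pos h1]
      rw [hstep, hmax]
      have hge : PySem.Str.len s ≤ l.foldl pvMaxStep (PySem.Str.len s) := pv_le_foldl_max _ _
      have hne' : l.foldl pvMaxStep (PySem.Str.len s) ≠ m0 := by omega
      rw [if_neg hne']
      rw [ih [s] (PySem.Str.len s) (by simp) (by simp)]
      by_cases hM : l.foldl pvMaxStep (PySem.Str.len s) = PySem.Str.len s
      · rw [if_pos hM, hM]
        have : pvCollect (PySem.Str.len s) [] s = [s] := by
          unfold pvCollect; rw [if_pos ⟨rfl, List.not_mem_nil⟩]; rfl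
        rw [this]
      · rw [if_neg hM]
        have hgt : PySem.Str.len s < l.foldl pvMaxStep (PySem.Str.len s) := lt_of_le_of_ne hge (Ne.symm hM)
        have : pvCollect (l.foldl pvMaxStep (PySem.Str.len s)) [] s = [] := by
          unfold pvCollect; rw [if_neg (fun h => hM h.1.symm)]
        rw [this]
    · have hmax : pvMaxStep m0 s = m0 := by
        unfold pvMaxStep; rw [if_neg h1]
      rw [hmax]
      have hge : m0 ≤ l.foldl pvMaxStep m0 := pv_le_foldl_max _ _
      by_cases h2 : PySem.Str.len s = m0 ∧ s ∉ acc
      · -- equal length, new string: appended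
        have hstep : pvStepA acc s = acc ++ [s] := by
          unfold pvStepA; rw [hh, if_neg h1, if_pos h2]
        rw [hstep]
        have hlen' : ∀ a ∈ acc ++ [s], PySem.Str.len a = m0 := by
          intro a ha
          rcases List.mem_append.mp ha with ha | ha
          · exact hlen a ha
          · simp at ha; subst ha; exact h2.1
        rw [ih (acc ++ [s]) m0 (by simp) hlen']
        by_cases hM : l.foldl pvMaxStep m0 = m0
        · rw [if_pos hM, if_pos hM]
          have : pvCollect m0 acc s = acc ++ [s] := by
            unfold pvCollect; rw [if_pos h2]
          rw [this]
        · rw [if_neg hM, if_neg hM]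
          have hgt : m0 < l.foldl pvMaxStep m0 := lt_of_le_of_ne hge (Ne.symm hM)
          have : pvCollect (l.foldl pvMaxStep m0) [] s = [] := by
            unfold pvCollect
            rw [if_neg (fun h => by rw [h2.1] at h; exact hM h.1.symm)]
          rw [this]
      · -- shorter, or a duplicate: accumulator unchanged
        have hstep : pvStepA acc s = acc := by
          simp only [pvStepA, hh]
          rw [if_neg h1, if_neg h2]
        rw [hstep, ih acc m0 hne hlen]
        by_cases hM : l.foldl pvMaxStep m0 = m0
        · rw [if_pos hM, if_pos hM]
          have : pvCollect m0 acc s = acc := by simp only [pvCollect]; rw [if_neg h2]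
          rw [this]
        · rw [if_neg hM, if_neg hM]
          have hgt : m0 < l.foldl pvMaxStep m0 := lt_of_le_of_ne hge (Ne.symm hM)
          have hle : PySem.Str.len s ≤ m0 := by omega
          have : pvCollect (l.foldl pvMaxStep m0) [] s = [] := by
            unfold pvCollect
            rw [if_neg (fun h => by omega)]
          rw [this]

-- ===== VERDICT (by name: the statement is the Claim_ definition above) =====
theorem pisimmat_spec : Claim_equal_pisimmat := by
  intro lista _hdom hpre
  unfold Spec_pisimmat pisimmat pisimmat_alt
  match lista, hpre with
  | x :: rest, _ =>
    have hget : PySem.List.pyGet? (x :: rest) (0 : Int) = some x := by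
      simp
    rw [hget]
    simp only
    rw [pv_main (x :: rest) [x] (PySem.Str.len x) (by simp) (by simp)]
    set M := (x :: rest).foldl pvMaxStep (PySem.Str.len x) with hM
    by_cases hc : M = PySem.Str.len x
    · rw [if_pos hc, hc]
      simp only [List.foldl_cons]
      have h1 : pvCollect (PySem.Str.len x) [] x = [x] := by simp [pvCollect]
      have h2 : pvCollect (PySem.Str.len x) [x] x = [x] := by simp [pvCollect]
      rw [h1, h2]
    · rw [if_neg hc]
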